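-- pv_equiv track=rewrite | github.com/rec/doks | doks/rst/__init__.py | section_characters
-- ===== SOURCE A (Python) =====
-- SECTIONS = '-=~_+*#`\':<>^"'
--
-- def section_characters(lines):
--     sections = ''
--     pline = ''
--     for line in lines:
--         if line and pline:
--             s = line[0]
--             if s in SECTIONS and s not in sections and len(set(line)) == 1:
--                 sections += s
--         pline = line
--
--     return ''.join((sections, *(s for s in SECTIONS if s not in sections)))
-- ===== SOURCE B (Python) =====
-- SECTIONS = '-=~_+*#`\':<>^"'
--
-- def section_characters(lines):
--     lines = list(lines)
--     cands = [ln[0] for prev, ln in zip(lines, lines[1:])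
--              if prev and ln and ln[0] in SECTIONS and len(set(ln)) == 1]
--     seen = ''.join(dict.fromkeys(cands))
--     return seen + ''.join(c for c in SECTIONS if c not in seen)
-- ===== Notes on version B (the rewrite author's own statement) =====
-- stated objective: alternative
-- what changed: A threads a (sections, previous-line) state through one fold, testing membership in the growing string at each step; B is stateless and staged: it zips the line list with its tail to get adjacent pairs, extracts all qualifying underline characters by a comprehension, deduplicates them once with dict.fromkeys, and appends the unseen SECTIONS characters.
import Mathlib
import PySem

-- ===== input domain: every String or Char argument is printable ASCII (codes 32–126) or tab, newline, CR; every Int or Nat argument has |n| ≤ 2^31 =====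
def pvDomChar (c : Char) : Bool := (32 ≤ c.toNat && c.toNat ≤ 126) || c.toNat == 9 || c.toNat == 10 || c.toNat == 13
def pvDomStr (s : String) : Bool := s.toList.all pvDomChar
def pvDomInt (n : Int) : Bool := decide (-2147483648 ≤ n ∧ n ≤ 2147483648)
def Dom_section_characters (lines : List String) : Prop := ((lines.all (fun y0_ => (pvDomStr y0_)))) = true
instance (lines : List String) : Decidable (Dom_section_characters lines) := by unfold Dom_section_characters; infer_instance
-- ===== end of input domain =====

-- B replaces A's stateful fold by staged passes: zip adjacent line pairs, extract
-- qualifying underline chars, dedupe once, append unseen SECTIONS chars (objective: alternative).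

-- ===== PORT A =====
def pvSECTIONS : List Char := ['-', '=', '~', '_', '+', '*', '#', '`', '\'', ':', '<', '>', '^', '"']

-- state = (sections, pline); 's in SECTIONS' on the single char line[0] is char membership
def pvStepA (st : List Char × List Char) (line : List Char) : List Char × List Char :=
  (match line, st.2 with
   | s :: _, _ :: _ =>
     if s ∈ pvSECTIONS ∧ s ∉ st.1 ∧ (PySem.Set.ofList line).length = 1
     then st.1 ++ [s] else st.1
   | _, _ => st.1, line)

def section_characters (lines : List String) : String :=
  let secs := ((lines.map String.toList).foldl pvStepA ([], [])).1
  String.mk (secs ++ pvSECTIONS.filter (fun c => !secs.contains c))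

-- ===== PORT B =====
def pvSECS : List Char := "-=~_+*#`':<>^\"".toList

-- the comprehension's body on one (prev, ln) pair
def pvCand (pr : List Char × List Char) : Option Char :=
  match pr.1, pr.2 with
  | _ :: _, s :: _ =>
    if s ∈ pvSECS ∧ (PySem.Set.ofList pr.2).length = 1 then some s else none
  | _, _ => none

def section_characters_alt (lines : List String) : String :=
  let ls := lines.map String.toList
  let cands := (ls.zip ls.tail).filterMap pvCand
  let seen := PySem.List.dedup cands
  String.mk (seen ++ pvSECS.filter (fun c => decide (c ∉ seen)))

-- ===== PRECONDITION & SPEC =====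
def Spec_section_characters (lines : List String) (out : String) : Prop := out = section_characters_alt lines
instance (lines : List String) (out : String) : Decidable (Spec_section_characters lines out) := by unfold Spec_section_characters; infer_instance

-- ===== CLAIM =====
def Claim_equal_section_characters : Prop := ∀ (lines : List String), Dom_section_characters lines → Spec_section_characters lines (section_characters lines)

-- ===== LEMMAS AND PROOFS =====

lemma pvSECS_eq : pvSECS = pvSECTIONS := by decide

-- candidates of the pair sequence (p, L0), (L0, L1), …
def pvCandsAux : List Char → List (List Char) → List Char
  | _, [] => []
  | p, l :: rest => (pvCand (p, l)).toList ++ pvCandsAux l rest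

lemma candsAux_eq_zip (M : List (List Char)) : ∀ (p : List Char),
    pvCandsAux p M = ((p :: M).zip M).filterMap pvCand := by
  induction M with
  | nil => intro p; rfl
  | cons m rest ih =>
    intro p
    show (pvCand (p, m)).toList ++ pvCandsAux m rest
        = List.filterMap pvCand ((p, m) :: (m :: rest).zip rest)
    rw [ih m, List.filterMap_cons]
    cases pvCand (p, m) <;> simp

lemma cands_eq (ls : List (List Char)) :
    (ls.zip ls.tail).filterMap pvCand = pvCandsAux [] ls := by
  cases ls with
  | nil => rfl
  | cons m rest =>
    show List.filterMap pvCand ((m :: rest).zip rest)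
        = (pvCand ([], m)).toList ++ pvCandsAux m rest
    rw [candsAux_eq_zip rest m]
    rfl

-- A's fold is the Set.add fold of the candidate list
lemma foldA_eq_add (L : List (List Char)) : ∀ (s p : List Char),
    (L.foldl pvStepA (s, p)).1 = (pvCandsAux p L).foldl PySem.Set.add s := by
  induction L with
  | nil => intro s p; rfl
  | cons l rest ih =>
    intro s p
    have hstep : pvStepA (s, p) l = ((pvCandsAux p [l]).foldl PySem.Set.add s, l) := by
      match l, p with
      | [], q => cases q <;> rfl
      | x :: xs, [] => rfl
      | x :: xs, y :: ys =>
        show (if x ∈ pvSECTIONS ∧ x ∉ s ∧ (PySem.Set.ofList (x :: xs)).length = 1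
              then s ++ [x] else s, x :: xs) = _
        simp only [pvCandsAux, pvCand, pvSECS_eq]
        by_cases h1 : x ∈ pvSECTIONS ∧ (PySem.Set.ofList (x :: xs)).length = 1
        · rw [if_pos h1]
          by_cases h2 : x ∈ s
          · rw [if_neg (by tauto)]
            simp [h2]
          · rw [if_pos ⟨h1.1, h2, h1.2⟩]
            simp [h2]
        · rw [if_neg (by tauto), if_neg h1]
          simp
    rw [List.foldl_cons, hstep]
    show (rest.foldl pvStepA ((pvCandsAux p [l]).foldl PySem.Set.add s, l)).1 = _
    rw [ih]
    show _ = ((pvCand (p, l)).toList ++ pvCandsAux l rest).foldl PySem.Set.add s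
    rw [List.foldl_append]
    simp [pvCandsAux]

-- ===== VERDICT =====
theorem section_characters_spec : Claim_equal_section_characters := by
  intro lines _
  unfold Spec_section_characters
  show String.mk (((lines.map String.toList).foldl pvStepA ([], [])).1
      ++ pvSECTIONS.filter (fun c => !(((lines.map String.toList).foldl pvStepA ([], [])).1.contains c)))
    = String.mk ((PySem.List.dedup (((lines.map String.toList).zip (lines.map String.toList).tail).filterMap pvCand))
      ++ pvSECS.filter (fun c => decide (c ∉ PySem.List.dedup (((lines.map String.toList).zip (lines.map String.toList).tail).filterMap pvCand))))
  rw [cands_eq, PySem.List.dedup_eq_ofList, PySem.Set.ofList_eq_foldl, ← foldA_eq_add, pvSECS_eq]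
  congr 2
  apply List.filter_congr
  intro c _
  simp
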